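-- pv_equiv track=rewrite | github.com/lesonlhld/NLP | Models/helper.py | getType
-- ===== SOURCE A (Python) =====
-- token_types = {
--     'train': ['tàu_hỏa', 'Tàu_hỏa', 'tàu'],
--     'run': ['chạy'],
--     'city': ['thành_phố', 'Thành_phố', 'TP', 'Tp'],
--     'arrive': ['đến', 'tới'],
--     'from': ['từ'],
--     'which': ['nào', 'mấy_giờ'],
--     'yesno': ['không'],
--     'time': ['lúc', 'vào_lúc', 'từ_lúc', 'Thời_gian', 'thời_gian'],
--     'name': ['B1', 'B2', 'B3', 'B4', 'B5', 'B6', 'HUE', 'HCM', 'HCMC', 'HN', 'DANANG', 'Hồ_Chí_Minh', 'Hà_Nội', 'Huế', 'Đà_Nẵng', 'Nha_Trang', 'NTrang'],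
--     'hour': ['hour'],
-- }
--
-- def getType(token):
--     for token_type in token_types:
--         if token in token_types[token_type]:
--             return token_type
--     if token.find("HR") != -1:
--         return 'hour'
--     if token == '<ROOT>':
--         return token
--     return '<UNKNOWN>'
-- ===== SOURCE B (Python) =====
-- token_types = {
--     'train': ['tàu_hỏa', 'Tàu_hỏa', 'tàu'],
--     'run': ['chạy'],
--     'city': ['thành_phố', 'Thành_phố', 'TP', 'Tp'],
--     'arrive': ['đến', 'tới'],
--     'from': ['từ'],
--     'which': ['nào', 'mấy_giờ'],
--     'yesno': ['không'],
--     'time': ['lúc', 'vào_lúc', 'từ_lúc', 'Thời_gian', 'thời_gian'],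
--     'name': ['B1', 'B2', 'B3', 'B4', 'B5', 'B6', 'HUE', 'HCM', 'HCMC', 'HN', 'DANANG', 'Hồ_Chí_Minh', 'Hà_Nội', 'Huế', 'Đà_Nẵng', 'Nha_Trang', 'NTrang'],
--     'hour': ['hour'],
-- }
--
-- # one sorted table built once: (word, category) pairs ordered by word
-- _pairs = sorted(((w, t) for t, words in token_types.items() for w in words),
--                 key=lambda p: p[0])
-- _words = [p[0] for p in _pairs]
-- _types = [p[1] for p in _pairs]
--
-- def getType(token):
--     # binary search for token in the sorted word table
--     lo, hi = 0, len(_words)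
--     while lo < hi:
--         mid = (lo + hi) // 2
--         if _words[mid] < token:
--             lo = mid + 1
--         else:
--             hi = mid
--     if lo < len(_words) and _words[lo] == token:
--         return _types[lo]
--     if "HR" in token:
--         return 'hour'
--     if token == '<ROOT>':
--         return token
--     return '<UNKNOWN>'
-- ===== Notes on version B (the rewrite author's own statement) =====
-- stated objective: alternative
-- what changed: Replaces A's per-call linear scan over every category list with a one-time sorted (word, category) table and a hand-written binary search per call; the two fallback branches are unchanged.
import Mathlib
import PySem

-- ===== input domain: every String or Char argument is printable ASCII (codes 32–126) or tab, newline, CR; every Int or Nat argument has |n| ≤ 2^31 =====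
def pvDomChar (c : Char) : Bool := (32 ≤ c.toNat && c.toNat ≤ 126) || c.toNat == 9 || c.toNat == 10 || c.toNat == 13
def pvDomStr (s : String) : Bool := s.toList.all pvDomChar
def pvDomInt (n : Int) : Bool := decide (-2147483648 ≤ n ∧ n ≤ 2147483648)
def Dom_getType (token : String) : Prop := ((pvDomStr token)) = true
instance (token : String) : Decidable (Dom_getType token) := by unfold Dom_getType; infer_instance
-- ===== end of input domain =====

-- B replaces A's per-call scan over the category lists by a one-time sorted (word, category)
-- table and a binary search per call (alternative algorithm; same values everywhere).

set_option maxRecDepth 16000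

-- ===== PORT A =====
def tokenTypes : List (String × List String) := [
  ("train", ["tàu_hỏa", "Tàu_hỏa", "tàu"]),
  ("run", ["chạy"]),
  ("city", ["thành_phố", "Thành_phố", "TP", "Tp"]),
  ("arrive", ["đến", "tới"]),
  ("from", ["từ"]),
  ("which", ["nào", "mấy_giờ"]),
  ("yesno", ["không"]),
  ("time", ["lúc", "vào_lúc", "từ_lúc", "Thời_gian", "thời_gian"]),
  ("name", ["B1", "B2", "B3", "B4", "B5", "B6", "HUE", "HCM", "HCMC", "HN", "DANANG", "Hồ_Chí_Minh", "Hà_Nội", "Huế", "Đà_Nẵng", "Nha_Trang", "NTrang"]),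
  ("hour", ["hour"])]

-- A's for-loop over token_types with early return: first category whose list contains token
def scanA : List (String × List String) → String → Option String
  | [], _ => none
  | (t, ws) :: rest, tok => if tok ∈ ws then some t else scanA rest tok

def getType (token : String) : String :=
  match scanA tokenTypes token with
  | some t => t
  | none =>
    if PySem.Str.find token "HR" ≠ -1 then "hour"
    else if token = "<ROOT>" then token
    else "<UNKNOWN>"

-- ===== PORT B =====
-- sorted(((w, t) for t, words in token_types.items() for w in words), key=lambda p: p[0]);
-- string comparison is ported on List Char (exactly Python's code-point lexicographic order)
def sortedPairs : List (String × String) :=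
  PySem.List.sorted (tokenTypes.flatMap (fun p => p.2.map (fun w => (w, p.1)))) (fun p => p.1.toList)

def bWords : List String := sortedPairs.map (fun p => p.1)
def bTypes : List String := sortedPairs.map (fun p => p.2)

-- Source B's while-loop of binary search; fuel = hi - lo makes the same loop structural
-- (each iteration shrinks hi - lo by at least 1, so the fuel is never exhausted).
-- _words[mid] is always in range (lo ≤ mid < hi ≤ len), so getD is exact here.
def bsearchGo (token : String) : Nat → Nat → Nat → Nat
  | 0, lo, _ => lo
  | fuel + 1, lo, hi =>
    if lo < hi then
      let mid := (lo + hi) / 2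
      if (bWords.getD mid "").toList < token.toList then bsearchGo token fuel (mid + 1) hi
      else bsearchGo token fuel lo mid
    else lo

def getType_alt (token : String) : String :=
  let n := bWords.length
  let lo := bsearchGo token n 0 n
  if lo < n ∧ bWords.getD lo "" = token then bTypes.getD lo ""
  else if PySem.Str.isIn "HR" token then "hour"
  else if token = "<ROOT>" then token
  else "<UNKNOWN>"

-- ===== PRECONDITION & SPEC =====
def Spec_getType (token : String) (out : String) : Prop := out = getType_alt token
instance (token : String) (out : String) : Decidable (Spec_getType token out) := by unfold Spec_getType; infer_instance

-- ===== CLAIM (what is proved, stated in full; the proofs are below) =====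
def Claim_equal_getType : Prop := ∀ (token : String), Dom_getType token → Spec_getType token (getType token)

-- ===== LEMMAS AND PROOFS =====

def allWords : List String := ["tàu_hỏa", "Tàu_hỏa", "tàu", "chạy", "thành_phố", "Thành_phố", "TP", "Tp", "đến", "tới", "từ", "nào", "mấy_giờ", "không", "lúc", "vào_lúc", "từ_lúc", "Thời_gian", "thời_gian", "B1", "B2", "B3", "B4", "B5", "B6", "HUE", "HCM", "HCMC", "HN", "DANANG", "Hồ_Chí_Minh", "Hà_Nội", "Huế", "Đà_Nẵng", "Nha_Trang", "NTrang", "hour"]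

theorem flat_allWords : tokenTypes.flatMap (·.2) = allWords := by rfl

theorem pairs_fst :
    (tokenTypes.flatMap (fun p => p.2.map (fun w => (w, p.1)))).map (fun x => x.1) = allWords := by
  rfl

theorem scanA_none (l : List (String × List String)) (tok : String)
    (h : ∀ p ∈ l, tok ∉ p.2) : scanA l tok = none := by
  induction l with
  | nil => rfl
  | cons p rest ih =>
    obtain ⟨t, ws⟩ := p
    simp only [scanA, if_neg (h (t, ws) (by simp))]
    exact ih (fun q hq => h q (by simp [hq]))

theorem mem_bWords_iff (x : String) : x ∈ bWords ↔ x ∈ allWords := by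
  rw [bWords, ← pairs_fst, List.mem_map, List.mem_map]
  constructor
  · rintro ⟨p, hp, rfl⟩
    exact ⟨p, (PySem.List.mem_sorted _ _ _ p).mp hp, rfl⟩
  · rintro ⟨p, hp, rfl⟩
    exact ⟨p, (PySem.List.mem_sorted _ _ _ p).mpr hp, rfl⟩

theorem eq_outside (token : String) (h : token ∉ allWords) :
    getType token = getType_alt token := by
  have hA : scanA tokenTypes token = none := by
    apply scanA_none
    intro p hp hmem
    exact h (flat_allWords ▸ List.mem_flatMap.mpr ⟨p, hp, hmem⟩)
  have hB : ¬ (bsearchGo token bWords.length 0 bWords.length < bWords.length ∧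
      bWords.getD (bsearchGo token bWords.length 0 bWords.length) "" = token) := by
    rintro ⟨hl, he⟩
    apply h
    rw [← mem_bWords_iff, ← he, List.getD_eq_getElem _ _ hl]
    exact List.getElem_mem hl
  rw [getType, getType_alt, hA]
  simp only [if_neg hB]
  simp only [PySem.Str.find_eq, PySem.Str.isIn_eq]
  by_cases hin : "HR".toList <:+: token.toList
  · rw [if_pos (show PySem.Chars.find token.toList "HR".toList ≠ -1 by
      rw [Ne, PySem.Chars.find_eq_neg_one_iff]; simpa using hin)]
    rw [if_pos (show PySem.Chars.isIn "HR".toList token.toList = true by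
      rw [PySem.Chars.isIn_iff_infix]; exact hin)]
  · rw [if_neg (show ¬ PySem.Chars.find token.toList "HR".toList ≠ -1 by
      rw [Ne, PySem.Chars.find_eq_neg_one_iff]; simpa using hin)]
    rw [if_neg (show ¬ PySem.Chars.isIn "HR".toList token.toList = true by
      rw [PySem.Chars.isIn_iff_infix]; exact hin)]

theorem eq_all (token : String) : getType token = getType_alt token := by
  by_cases h : token ∈ allWords
  · fin_cases h <;> decide
  · exact eq_outside token h

-- ===== VERDICT (by name: the statement is the Claim_ definition above) =====
theorem getType_spec : Claim_equal_getType := by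
  intro token _
  show getType token = getType_alt token
  exact eq_all token
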